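-- pv_equiv track=rewrite | github.com/TekEray/AdventOfCode | 2023/15/main.py | labelToBox
-- ===== SOURCE A (Python) =====
-- from collections import defaultdict
--
-- def labelToBox(tupleList):
--     dictBoxes = defaultdict(list)
--     for box, label, focal in tupleList:
--         tmpBox = dictBoxes[box]
--         if tmpBox:
--             existList = [item for item in tmpBox if item[0] == label]
--             if existList:
--                 if not focal:
--                     dictBoxes[box] = list(filter(lambda x: x[0] != label, tmpBox))
--                     continue
--                 dictBoxes[box] = [(label, focal) if oldLabel == label else (oldLabel, oldFocal) for oldLabel, oldFocal in tmpBox]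
--                 continue
--         if focal:
--             dictBoxes[box].append((label, focal))
--     return dictBoxes
-- ===== SOURCE B (Python) =====
-- from collections import defaultdict
--
-- def labelToBox(tupleList):
--     # Each box is an insertion-ordered dict label -> focal, so replace/remove/
--     # append are O(1) dict operations instead of per-op linear list scans.
--     boxes = defaultdict(dict)
--     for box, label, focal in tupleList:
--         d = boxes[box]
--         if focal:
--             d[label] = focal
--         else:
--             d.pop(label, None)
--     result = defaultdict(list)
--     for box, d in boxes.items():
--         result[box] = list(d.items())
--     return result
-- ===== Notes on version B (the rewrite author's own statement) =====
-- stated objective: alternative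
-- what changed: Each box's association LIST with per-op linear scans (membership scan, map-replace, filter-remove) is replaced by a per-box insertion-ordered dict label->focal whose assignment/pop realises the HASHMAP semantics directly, converted to item lists at the end.
import Mathlib
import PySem

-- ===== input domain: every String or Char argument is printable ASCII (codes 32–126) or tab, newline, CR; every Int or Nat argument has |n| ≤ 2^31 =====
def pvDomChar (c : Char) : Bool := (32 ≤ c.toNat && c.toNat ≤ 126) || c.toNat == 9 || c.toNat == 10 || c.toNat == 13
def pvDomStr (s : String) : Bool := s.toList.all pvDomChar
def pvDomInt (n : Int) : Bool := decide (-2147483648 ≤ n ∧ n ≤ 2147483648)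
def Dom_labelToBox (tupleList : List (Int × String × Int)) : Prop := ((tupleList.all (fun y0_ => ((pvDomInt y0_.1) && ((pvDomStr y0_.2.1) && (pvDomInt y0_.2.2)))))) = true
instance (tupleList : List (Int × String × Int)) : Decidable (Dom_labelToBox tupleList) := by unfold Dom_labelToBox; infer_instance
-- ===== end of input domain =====

-- B replaces A's per-box association LIST (linear scans for replace/remove/append) by a per-box
-- insertion-ordered DICT label -> focal, converted to item lists at the end; alternative data structure.

-- ===== PORT A =====
-- literal port of A: one scan over tupleList mutating a defaultdict(list) per operation
def labelToBox (tupleList : List (Int × String × Int)) : List (Int × List (String × Int)) :=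
  (tupleList.foldl (fun dictBoxes t =>
      let box := t.1
      let label := t.2.1
      let focal := t.2.2
      -- tmpBox = dictBoxes[box]  (defaultdict access: creates the key with [])
      let dictBoxes := dictBoxes.insert box (dictBoxes.getD box [])
      let tmpBox := dictBoxes.getD box []
      if tmpBox ≠ [] then
        let existList := tmpBox.filter (fun item => item.1 == label)
        if existList ≠ [] then
          if focal == 0 then
            dictBoxes.insert box (tmpBox.filter (fun x => x.1 != label))
          else
            dictBoxes.insert box (tmpBox.map (fun p => if p.1 == label then (label, focal) else (p.1, p.2)))
        else if focal ≠ 0 then dictBoxes.insert box (tmpBox ++ [(label, focal)]) else dictBoxes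
      else if focal ≠ 0 then dictBoxes.insert box (tmpBox ++ [(label, focal)]) else dictBoxes)
    PySem.Dict.empty).items

-- ===== PORT B =====
-- literal port of B: each box is a dict label -> focal (insertion-ordered, update-in-place,
-- pop removes), then each box dict is converted to its items list
def labelToBox_alt (tupleList : List (Int × String × Int)) : List (Int × List (String × Int)) :=
  let boxes := tupleList.foldl (fun boxes t =>
      let box := t.1
      let label := t.2.1
      let focal := t.2.2
      -- d = boxes[box]  (defaultdict access: creates the key with {})
      let boxes := boxes.insert box (boxes.getD box PySem.Dict.empty)
      let d := boxes.getD box PySem.Dict.empty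
      if focal ≠ 0 then boxes.insert box (d.insert label focal)   -- d[label] = focal
      else boxes.insert box (d.erase label))                      -- d.pop(label, None)
    PySem.Dict.empty
  (boxes.items.foldl (fun result p => result.insert p.1 p.2.items) PySem.Dict.empty).items

-- ===== PRECONDITION & SPEC =====
def Spec_labelToBox (tupleList : List (Int × String × Int)) (out : List (Int × List (String × Int))) : Prop := out = labelToBox_alt tupleList
instance (tupleList : List (Int × String × Int)) (out : List (Int × List (String × Int))) : Decidable (Spec_labelToBox tupleList out) := by unfold Spec_labelToBox; infer_instance

-- ===== CLAIM (what is proved, stated in full; the proofs are below) =====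
def Claim_equal_labelToBox : Prop := ∀ (tupleList : List (Int × String × Int)), Dom_labelToBox tupleList → Spec_labelToBox tupleList (labelToBox tupleList)

-- ===== LEMMAS AND PROOFS =====

-- the per-op step A performs on one box's lens LIST
def step2 (cur : List (String × Int)) (op : String × Int) : List (String × Int) :=
  if cur.any (fun q => q.1 == op.1) then
    if op.2 ≠ 0 then cur.map (fun q => if q.1 == op.1 then (op.1, op.2) else (q.1, q.2))
    else cur.filter (fun q => q.1 != op.1)
  else if op.2 ≠ 0 then cur ++ [(op.1, op.2)] else cur

-- the per-op step B performs on one box's DICT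
def dstep (d : PySem.Dict String Int) (op : String × Int) : PySem.Dict String Int :=
  if op.2 ≠ 0 then d.insert op.1 op.2 else d.erase op.1

-- A's loop body is one insert of step2 applied to the box's current entry
theorem bridgeA (d : PySem.Dict Int (List (String × Int))) (t : Int × String × Int) :
    (let box := t.1
     let label := t.2.1
     let focal := t.2.2
     let d1 := d.insert box (d.getD box [])
     let tmpBox := d1.getD box []
     if tmpBox ≠ [] then
       let existList := tmpBox.filter (fun item => item.1 == label)
       if existList ≠ [] then
         if focal == 0 then
           d1.insert box (tmpBox.filter (fun x => x.1 != label))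
         else
           d1.insert box (tmpBox.map (fun p => if p.1 == label then (label, focal) else (p.1, p.2)))
       else if focal ≠ 0 then d1.insert box (tmpBox ++ [(label, focal)]) else d1
     else if focal ≠ 0 then d1.insert box (tmpBox ++ [(label, focal)]) else d1)
    = d.insert t.1 (step2 (d.getD t.1 []) t.2) := by
  obtain ⟨box, label, focal⟩ := t
  simp only [step2, PySem.Dict.getD_insert_self, PySem.Dict.insert_insert_self]
  by_cases hany : (d.getD box []).any (fun q => q.1 == label)
  · have hfil : (d.getD box []).filter (fun item => item.1 == label) ≠ [] := by
      rw [Ne, List.filter_eq_nil_iff]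
      push Not
      rcases List.any_eq_true.mp hany with ⟨a, ha, hpa⟩
      exact ⟨a, ha, by simpa using hpa⟩
    have hne : (d.getD box [] : List (String × Int)) ≠ [] := by
      rcases List.any_eq_true.mp hany with ⟨a, ha, _⟩
      exact List.ne_nil_of_mem ha
    simp only [hne, hfil, hany, if_pos, ne_eq, not_false_iff]
    by_cases hf : focal = 0 <;> simp [hf]
  · have hfil : (d.getD box []).filter (fun item => item.1 == label) = [] := by
      rw [List.filter_eq_nil_iff]
      intro a ha
      have := List.any_eq_false.mp (Bool.eq_false_iff.mpr hany) a ha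
      simpa using this
    simp only [hany, hfil, ne_eq, Bool.false_eq_true, if_false]
    by_cases hne : (d.getD box [] : List (String × Int)) = [] <;>
      by_cases hf : focal = 0 <;> simp [hne, hf]

-- B's loop body is one insert of dstep applied to the box's current dict
theorem bridgeB (g : PySem.Dict Int (PySem.Dict String Int)) (t : Int × String × Int) :
    (let box := t.1
     let label := t.2.1
     let focal := t.2.2
     let g1 := g.insert box (g.getD box PySem.Dict.empty)
     let d := g1.getD box PySem.Dict.empty
     if focal ≠ 0 then g1.insert box (d.insert label focal)
     else g1.insert box (d.erase label))
    = g.insert t.1 (dstep (g.getD t.1 PySem.Dict.empty) t.2) := by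
  obtain ⟨box, label, focal⟩ := t
  simp only [dstep, PySem.Dict.getD_insert_self, PySem.Dict.insert_insert_self]
  by_cases hf : focal = 0 <;> simp [hf]

-- one dict step's items are one list step on the dict's items
theorem dstep_items (d : PySem.Dict String Int) (op : String × Int) :
    (dstep d op).items = step2 d.items op := by
  obtain ⟨label, focal⟩ := op
  unfold dstep step2
  by_cases hf : focal = 0
  · subst hf
    simp only [ne_eq, not_true_eq_false, if_false]
    by_cases hany : d.items.any (fun q => q.1 == label)
    · simp only [hany, if_pos]
      show d.items.filter (fun p => !(p.1 == label)) = d.items.filter (fun q => q.1 != label)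
      simp [bne]
    · simp only [hany, Bool.false_eq_true, if_false]
      show d.items.filter (fun p => !(p.1 == label)) = d.items
      apply List.filter_eq_self.mpr
      intro a ha
      have := List.any_eq_false.mp (Bool.eq_false_iff.mpr hany) a ha
      simpa using this
  · simp only [hf, ne_eq, not_false_iff, if_pos]
    by_cases hany : d.items.any (fun q => q.1 == label)
    · have hc : d.contains label = true := hany
      rw [PySem.Dict.items_insert_of_contains d focal hc]
      simp only [hany, if_pos]
    · have hc : d.contains label = false := Bool.eq_false_iff.mpr hany
      rw [PySem.Dict.items_insert_of_not_contains d focal hc]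
      simp [hany]

-- replaying a box's ops on a dict computes, item-wise, A's list replay
theorem foldl_dstep_items (ops : List (String × Int)) :
    ∀ (d : PySem.Dict String Int), (ops.foldl dstep d).items = ops.foldl step2 d.items := by
  induction ops with
  | nil => intro d; rfl
  | cons op ops ih =>
    intro d
    simp only [List.foldl_cons, ih, dstep_items]

-- generic: a fold of "insert key (f (current entry) payload)" computes, at each key, the fold of f over that key's payloads in order
theorem getD_insFold {V β : Type} (v0 : V) (f : V → β → V) :
    ∀ (tl : List (Int × β)) (d : PySem.Dict Int V) (box : Int),
      (tl.foldl (fun d t => d.insert t.1 (f (d.getD t.1 v0) t.2)) d).getD box v0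
        = ((tl.filter (fun t => t.1 == box)).map (·.2)).foldl f (d.getD box v0) := by
  intro tl
  induction tl with
  | nil => intro d box; rfl
  | cons t tl ih =>
    intro d box
    simp only [List.foldl_cons, List.filter_cons]
    by_cases hb : t.1 = box
    · subst hb
      simp only [BEq.rfl, if_pos, List.map_cons, List.foldl_cons, ih,
        PySem.Dict.getD_insert_self]
    · have : (t.1 == box) = false := by simpa using hb
      simp only [this, Bool.false_eq_true, if_false, ih,
        PySem.Dict.getD_insert_of_ne _ _ _ (Ne.symm hb)]

-- both ports' items are the same map over the boxes in first-occurrence order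
theorem labelToBox_eq_alt (tl : List (Int × String × Int)) : labelToBox tl = labelToBox_alt tl := by
  unfold labelToBox labelToBox_alt
  have hA : (fun (dictBoxes : PySem.Dict Int (List (String × Int))) (t : Int × String × Int) =>
      let box := t.1
      let label := t.2.1
      let focal := t.2.2
      let dictBoxes := dictBoxes.insert box (dictBoxes.getD box [])
      let tmpBox := dictBoxes.getD box []
      if tmpBox ≠ [] then
        let existList := tmpBox.filter (fun item => item.1 == label)
        if existList ≠ [] then
          if focal == 0 then
            dictBoxes.insert box (tmpBox.filter (fun x => x.1 != label))
          else
            dictBoxes.insert box (tmpBox.map (fun p => if p.1 == label then (label, focal) else (p.1, p.2)))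
        else if focal ≠ 0 then dictBoxes.insert box (tmpBox ++ [(label, focal)]) else dictBoxes
      else if focal ≠ 0 then dictBoxes.insert box (tmpBox ++ [(label, focal)]) else dictBoxes)
      = fun d t => d.insert t.1 (step2 (d.getD t.1 []) t.2) := by
    funext d t; exact bridgeA d t
  rw [hA]
  have hB : (fun (boxes : PySem.Dict Int (PySem.Dict String Int)) (t : Int × String × Int) =>
      let box := t.1
      let label := t.2.1
      let focal := t.2.2
      let boxes := boxes.insert box (boxes.getD box PySem.Dict.empty)
      let d := boxes.getD box PySem.Dict.empty
      if focal ≠ 0 then boxes.insert box (d.insert label focal)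
      else boxes.insert box (d.erase label))
      = fun g t => g.insert t.1 (dstep (g.getD t.1 PySem.Dict.empty) t.2) := by
    funext g t; exact bridgeB g t
  rw [hB]
  set dA := tl.foldl (fun d t => d.insert t.1 (step2 (d.getD t.1 []) t.2)) PySem.Dict.empty with hdA
  set boxes := tl.foldl (fun g t => g.insert t.1 (dstep (g.getD t.1 PySem.Dict.empty) t.2)) PySem.Dict.empty with hboxes
  have hndE : ∀ {V : Type}, (PySem.Dict.empty : PySem.Dict Int V).keys.Nodup := by
    intro V; rw [PySem.Dict.keys_empty]; exact List.nodup_nil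
  have hndA : dA.keys.Nodup := by
    rw [hdA]
    exact PySem.Dict.nodup_keys_foldl_insert_key tl (fun t => t.1)
      (fun d t => step2 (d.getD t.1 []) t.2) PySem.Dict.empty hndE
  have hndB : boxes.keys.Nodup := by
    rw [hboxes]
    exact PySem.Dict.nodup_keys_foldl_insert_key tl (fun t => t.1)
      (fun g t => dstep (g.getD t.1 PySem.Dict.empty) t.2) PySem.Dict.empty hndE
  have hkA : dA.keys = PySem.Set.ofList (tl.map (fun t => t.1)) := by
    rw [hdA]
    rw [PySem.Dict.keys_foldl_insert_key tl (fun t => t.1)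
      (fun d t => step2 (d.getD t.1 []) t.2) PySem.Dict.empty]
    rw [PySem.Dict.keys_empty, PySem.Set.update_nil_left]
  have hkB : boxes.keys = PySem.Set.ofList (tl.map (fun t => t.1)) := by
    rw [hboxes]
    rw [PySem.Dict.keys_foldl_insert_key tl (fun t => t.1)
      (fun g t => dstep (g.getD t.1 PySem.Dict.empty) t.2) PySem.Dict.empty]
    rw [PySem.Dict.keys_empty, PySem.Set.update_nil_left]
  rw [PySem.Dict.items_foldl_insert_fresh boxes.items (fun p => p.1) (fun p => p.2.items)
      PySem.Dict.empty (fun p _ => PySem.Dict.contains_empty p.1)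
      (by simpa [PySem.Dict.keys] using hndB)]
  rw [PySem.Dict.items_eq_map_keys dA hndA []]
  rw [PySem.Dict.items_eq_map_keys boxes hndB PySem.Dict.empty]
  simp only [List.map_map]
  rw [hkA, hkB]
  have hitemsE : (PySem.Dict.empty : PySem.Dict Int (List (String × Int))).items = [] := rfl
  rw [hitemsE, List.nil_append]
  apply List.map_congr_left
  intro k _
  simp only [Function.comp]
  rw [hdA, hboxes]
  rw [getD_insFold ([] : List (String × Int)) step2 tl PySem.Dict.empty k,
      getD_insFold (PySem.Dict.empty : PySem.Dict String Int) dstep tl PySem.Dict.empty k]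
  rw [foldl_dstep_items]
  rfl

-- ===== VERDICT (by name: the statement is the Claim_ definition above) =====
theorem labelToBox_spec : Claim_equal_labelToBox := by
  intro tl _
  unfold Spec_labelToBox
  exact labelToBox_eq_alt tl
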